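-- pv_equiv track=rewrite | github.com/dimike96/Shift-Cipher-Brute-Force | main.py | brute_shift_all_or_defined
-- ===== SOURCE A (Python) =====
-- def brute_shift_all_or_defined(text, alphabet):
--     shifted_texts = []
--     for i in range(len(alphabet)):
--         shift = i
--         shifted_text = ''
--         for n in range(len(text)):
--             new_char = alphabet[(alphabet.index(text[n]) + i) % len(alphabet)]
--             shifted_text += new_char
--         shifted_texts.append(shifted_text)
--     return shifted_texts
-- ===== SOURCE B (Python) =====
-- def brute_shift_all_or_defined(text, alphabet):
--     n = len(alphabet)
--     outs = [''] * n
--     for c in text: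
--         idx = alphabet.index(c)
--         outs = [s + alphabet[(idx + i) % n] for i, s in enumerate(outs)]
--     return outs
-- ===== Notes on version B (the rewrite author's own statement) =====
-- stated objective: alternative
-- what changed: B inverts the loop nesting: one pass over the text, computing each character's alphabet index once and extending all len(alphabet) shift accumulators simultaneously, instead of A's per-shift passes that re-scan the alphabet for every character of every shift.
-- outside the precondition, e.g. on brute_shift_all_or_defined('x', ''): A returns [], B raises ValueError
import Mathlib
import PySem

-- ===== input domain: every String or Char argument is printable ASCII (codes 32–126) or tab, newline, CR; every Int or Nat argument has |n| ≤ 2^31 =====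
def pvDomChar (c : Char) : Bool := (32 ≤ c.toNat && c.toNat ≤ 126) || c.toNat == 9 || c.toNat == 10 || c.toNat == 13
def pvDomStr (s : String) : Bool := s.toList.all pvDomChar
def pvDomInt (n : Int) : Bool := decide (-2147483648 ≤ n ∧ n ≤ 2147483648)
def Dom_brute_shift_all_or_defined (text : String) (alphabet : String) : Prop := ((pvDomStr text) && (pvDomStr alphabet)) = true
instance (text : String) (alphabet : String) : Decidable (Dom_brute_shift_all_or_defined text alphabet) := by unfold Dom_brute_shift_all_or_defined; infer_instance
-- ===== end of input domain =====

-- B inverts A's loop nesting (one pass over the text updating all shift accumulators at once,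
-- each character's alphabet index computed once); objective: alternative decomposition, same result.

-- ===== PORT A =====
-- alphabet[(idx + i) % len(alphabet)]; the ' ' default is unreachable under Pre_ (in-range index)
def shiftChar (al : List Char) (idx i : Int) : Char :=
  PySem.List.pyGetD al (PySem.Int.mod (idx + i) (al.length : Int)) ' '

-- alphabet.index(c); the 0 default is unreachable under Pre_ (Python raises ValueError there)
def chIndex (al : List Char) (c : Char) : Int :=
  (((PySem.List.index? al c).getD 0 : Nat) : Int)

def brute_shift_all_or_defined (text : String) (alphabet : String) : List String :=
  let al := alphabet.toList
  (PySem.List.pyRange 0 (al.length : Int) 1).foldl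
    (fun shifted_texts i =>
      let shifted_text := text.toList.foldl
        (fun s c => s ++ [shiftChar al (chIndex al c) i]) []
      shifted_texts ++ [String.mk shifted_text]) []

-- ===== PORT B =====
def brute_shift_all_or_defined_alt (text : String) (alphabet : String) : List String :=
  let al := alphabet.toList
  let outs : List (List Char) := List.replicate al.length []
  (text.toList.foldl
    (fun outs c =>
      let idx := chIndex al c
      (PySem.List.enumerate outs).map (fun p => p.2 ++ [shiftChar al idx p.1]))
    outs).map String.mk

-- ===== PRECONDITION & SPEC =====
-- Pre_ excludes the inputs where A raises ValueError (a text character missing from a nonempty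
-- alphabet) and, with the same condition, nonempty text with an EMPTY alphabet: there A's empty
-- outer range accidentally returns [] before ever consulting the alphabet, while B's single text
-- pass raises ValueError.
def Pre_brute_shift_all_or_defined (text : String) (alphabet : String) : Prop :=
  (text.toList.all (fun c => alphabet.toList.contains c)) = true
instance (text : String) (alphabet : String) : Decidable (Pre_brute_shift_all_or_defined text alphabet) := by unfold Pre_brute_shift_all_or_defined; infer_instance

def pvWitness_brute_shift_all_or_defined : String × String := ("cab", "abc")

def Spec_brute_shift_all_or_defined (text : String) (alphabet : String) (out : List String) : Prop := out = brute_shift_all_or_defined_alt text alphabet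
instance (text : String) (alphabet : String) (out : List String) : Decidable (Spec_brute_shift_all_or_defined text alphabet out) := by unfold Spec_brute_shift_all_or_defined; infer_instance

-- ===== CLAIM (what is proved, stated in full; the proofs are below) =====
def Claim_equal_brute_shift_all_or_defined : Prop := ∀ (text : String) (alphabet : String), Dom_brute_shift_all_or_defined text alphabet → Pre_brute_shift_all_or_defined text alphabet → Spec_brute_shift_all_or_defined text alphabet (brute_shift_all_or_defined text alphabet)

-- ===== LEMMAS AND PROOFS =====

-- One step of B's fold on a state of the invariant shape "(pyRange 0 n 1).map g".
lemma enum_step (al : List Char) (g : Int → List Char) (c : Char) :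
    (PySem.List.enumerate ((PySem.List.pyRange 0 (al.length : Int) 1).map g)).map
      (fun p => p.2 ++ [shiftChar al (chIndex al c) p.1])
  = (PySem.List.pyRange 0 (al.length : Int) 1).map
      (fun i => g i ++ [shiftChar al (chIndex al c) i]) := by
  apply List.ext_getElem
  · simp [PySem.List.length_enumerate]
  · intro k h1 h2
    simp [PySem.List.getElem_enumerate, PySem.List.getElem_pyRange_one]

-- B's whole fold, by induction on the text with the accumulator function generalized.
lemma alt_fold (al : List Char) (tx : List Char) :
    ∀ g : Int → List Char,
    tx.foldl
      (fun outs c => (PySem.List.enumerate outs).map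
        (fun p => p.2 ++ [shiftChar al (chIndex al c) p.1]))
      ((PySem.List.pyRange 0 (al.length : Int) 1).map g)
  = (PySem.List.pyRange 0 (al.length : Int) 1).map
      (fun i => g i ++ tx.map (fun c => shiftChar al (chIndex al c) i)) := by
  induction tx with
  | nil => intro g; simp
  | cons c tx ih =>
    intro g
    simp only [List.foldl_cons, enum_step al g c, ih]
    simp [List.append_assoc]

lemma replicate_eq_map_pyRange (al : List Char) :
    List.replicate al.length ([] : List Char)
  = (PySem.List.pyRange 0 (al.length : Int) 1).map (fun _ => []) := by
  symm
  rw [List.eq_replicate_iff]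
  refine ⟨by simp [PySem.List.length_pyRange_one], ?_⟩
  intro b hb
  simp only [List.mem_map] at hb
  obtain ⟨_, _, h⟩ := hb
  exact h.symm

-- ===== VERDICT (by name: the statement is the Claim_ definition above) =====
theorem brute_shift_all_or_defined_spec : Claim_equal_brute_shift_all_or_defined := by
  intro text alphabet _ _
  unfold Spec_brute_shift_all_or_defined brute_shift_all_or_defined brute_shift_all_or_defined_alt
  dsimp only
  rw [replicate_eq_map_pyRange, alt_fold]
  simp only [PySem.List.foldl_append_singleton_eq_map, List.nil_append, List.map_map,
    Function.comp_def]
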